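-- pv_equiv track=rewrite | github.com/mrDanh11/Gem-Hunter | main.py | generate_cnf
-- ===== SOURCE A (Python) =====
-- import itertools
--
-- def varnum(r, c, width):
--     return r * width + c + 1
--
-- def neighbors(r, c, height, width):
--     for dr in [-1,0,1]:
--         for dc in [-1,0,1]:
--             if dr == 0 and dc == 0:
--                 continue
--             nr, nc = r+dr, c+dc
--             if 0 <= nr < height and 0 <= nc < width:
--                 yield nr, nc
--
-- def exactly_n(vars_, n):
--     # Ràng buộc đúng n biến trong vars_ là True:
--     # 1) ít nhất n: tổ hợp tất cả các tổ hợp vars_ chọn (len(vars_)-n+1) biến phủ (OR)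
--     # 2) tối đa n: loại bỏ các tổ hợp vars_ chọn (n+1) biến True cùng lúc (NOT)
--
--     # Cách đơn giản dùng quy tắc:
--     # Ít nhất n: Tổ hợp len(vars_)-n+1 biến phải có ít nhất một True
--     # Tối đa n: Tổ hợp (n+1) biến không được đồng thời True
--
--     clauses = []
--
--     length = len(vars_)
--     # Ít nhất n
--     for comb in itertools.combinations(vars_, length - n + 1):
--         clauses.append(list(comb))  # OR các biến
--
--     # Tối đa n
--     for comb in itertools.combinations(vars_, n + 1):
--         clauses.append([-v for v in comb])  # không thể tất cả cùng True
--
--     return clauses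
--
-- def generate_cnf(grid):
--     height = len(grid)
--     width = len(grid[0])
--     clauses = []
--
--     for r in range(height):
--         for c in range(width):
--             val = grid[r][c]
--             if val.isdigit():
--                 n = int(val)
--                 nbs = list(varnum(nr,nc,width) for nr,nc in neighbors(r,c,height,width))
--                 # Gán ràng buộc đúng n trong số các ô lân cận là trap (True)
--                 clauses.extend(exactly_n(nbs, n))
--             # Nếu ô là số hoặc trap/gem thì ta không gán biến gì cho ô đó
--             # Nhưng cần thêm ràng buộc:
--             # - Nếu ô là số => ô đó không phải trap
--             # - Nếu ô trống => không biết
--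
--     # Thêm ràng buộc ô có số không thể là trap
--     for r in range(height):
--         for c in range(width):
--             val = grid[r][c]
--             if val.isdigit():
--                 v = varnum(r,c,width)
--                 # Ô có số phải là False (không phải trap)
--                 clauses.append([-v])
--
--     return clauses
-- ===== SOURCE B (Python) =====
-- def varnum(r, c, width):
--     return r * width + c + 1
--
-- def neighbor_vars(r, c, height, width):
--     return [varnum(r + dr, c + dc, width)
--             for dr in (-1, 0, 1) for dc in (-1, 0, 1)
--             if (dr or dc) and 0 <= r + dr < height and 0 <= c + dc < width]
--
-- def combos(xs, k):
--     # all k-subsets of xs, in lexicographic (index) order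
--     if k == 0:
--         return [[]]
--     if not xs:
--         return []
--     head, tail = xs[0], xs[1:]
--     return [[head] + rest for rest in combos(tail, k - 1)] + combos(tail, k)
--
-- def generate_cnf(grid):
--     height, width = len(grid), len(grid[0])
--     count_clauses, unit_clauses = [], []
--     for r in range(height):
--         for c in range(width):
--             val = grid[r][c]
--             if val.isdigit():
--                 n = int(val)
--                 nbs = neighbor_vars(r, c, height, width)
--                 count_clauses += (combos(nbs, len(nbs) - n + 1)
--                                   + [[-v for v in comb] for comb in combos(nbs, n + 1)])
--                 unit_clauses.append([-varnum(r, c, width)])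
--     return count_clauses + unit_clauses
-- ===== Notes on version B (the rewrite author's own statement) =====
-- stated objective: simpler
-- what changed: B fuses A's two separate full-grid scans into a single pass that keeps two accumulator lists (counting clauses and unit clauses, concatenated at the end), and replaces itertools.combinations plus the exactly_n wrapper by a direct recursive k-subset enumeration emitting the same clauses in the same order.
import Mathlib
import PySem

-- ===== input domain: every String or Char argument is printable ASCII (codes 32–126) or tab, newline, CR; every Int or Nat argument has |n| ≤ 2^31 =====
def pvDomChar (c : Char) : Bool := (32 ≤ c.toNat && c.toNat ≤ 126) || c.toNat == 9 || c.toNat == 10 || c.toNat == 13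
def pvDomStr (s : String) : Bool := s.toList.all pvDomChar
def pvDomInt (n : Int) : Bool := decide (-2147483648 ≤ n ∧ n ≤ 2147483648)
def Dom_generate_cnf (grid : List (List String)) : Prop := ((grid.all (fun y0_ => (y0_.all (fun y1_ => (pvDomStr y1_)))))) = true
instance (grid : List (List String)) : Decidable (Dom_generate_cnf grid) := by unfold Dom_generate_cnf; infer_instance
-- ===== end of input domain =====

-- B fuses A's two separate grid scans into one pass keeping two accumulator lists, and
-- replaces itertools.combinations / exactly_n by a direct recursive k-subset enumeration (objective: simpler).

-- ===== PORT A =====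
def varnum (r c width : Int) : Int := r * width + c + 1

def neighborsA (r c height width : Int) : List (Int × Int) :=
  ([-1, 0, 1] : List Int).foldl (fun acc dr =>
    ([-1, 0, 1] : List Int).foldl (fun acc dc =>
      if dr = 0 ∧ dc = 0 then acc
      else
        let nr := r + dr
        let nc := c + dc
        if 0 ≤ nr ∧ nr < height ∧ 0 ≤ nc ∧ nc < width then acc ++ [(nr, nc)] else acc) acc) []

-- itertools.combinations (lexicographic by index); Python raises ValueError for negative k,
-- which Pre_ excludes, so the k < 0 branch is unclaimed.
def combAux : List Int → Nat → List (List Int)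
  | _, 0 => [[]]
  | [], _ + 1 => []
  | x :: t, k + 1 => (combAux t k).map (fun ys => x :: ys) ++ combAux t (k + 1)

def pyCombinations (xs : List Int) (k : Int) : List (List Int) :=
  if k < 0 then [] else combAux xs k.toNat

def exactly_n (vars_ : List Int) (n : Int) : List (List Int) :=
  let clauses : List (List Int) := []
  let length : Int := vars_.length
  let clauses := (pyCombinations vars_ (length - n + 1)).foldl
    (fun cs comb => cs ++ [comb]) clauses
  let clauses := (pyCombinations vars_ (n + 1)).foldl
    (fun cs comb => cs ++ [comb.map (fun v => -v)]) clauses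
  clauses

def generate_cnf (grid : List (List String)) : List (List Int) :=
  let height : Int := grid.length
  let width : Int := (PySem.List.pyGetD grid 0 []).length
  let clauses : List (List Int) := []
  let clauses := (PySem.List.pyRange 0 height 1).foldl (fun cl r =>
    (PySem.List.pyRange 0 width 1).foldl (fun cl c =>
      let val := PySem.List.pyGetD (PySem.List.pyGetD grid r []) c ""
      if PySem.Str.strIsdigit val then
        let n := (PySem.Int.ofStr? val).getD 0
        let nbs := (neighborsA r c height width).map (fun p => varnum p.1 p.2 width)
        cl ++ exactly_n nbs n
      else cl) cl) clauses
  (PySem.List.pyRange 0 height 1).foldl (fun cl r =>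
    (PySem.List.pyRange 0 width 1).foldl (fun cl c =>
      let val := PySem.List.pyGetD (PySem.List.pyGetD grid r []) c ""
      if PySem.Str.strIsdigit val then cl ++ [[-(varnum r c width)]]
      else cl) cl) clauses

-- ===== PORT B =====
def neighbor_vars (r c height width : Int) : List Int :=
  ([-1, 0, 1] : List Int).flatMap (fun dr =>
    ([-1, 0, 1] : List Int).flatMap (fun dc =>
      if (dr ≠ 0 ∨ dc ≠ 0) ∧ 0 ≤ r + dr ∧ r + dr < height ∧ 0 ≤ c + dc ∧ c + dc < width
      then [varnum (r + dr) (c + dc) width] else []))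

def combos (xs : List Int) (k : Int) : List (List Int) :=
  if k = 0 then [[]]
  else
    match xs with
    | [] => []
    | head :: tail => (combos tail (k - 1)).map (fun rest => head :: rest) ++ combos tail k

def generate_cnf_alt (grid : List (List String)) : List (List Int) :=
  let height : Int := grid.length
  let width : Int := (PySem.List.pyGetD grid 0 []).length
  let acc := (PySem.List.pyRange 0 height 1).foldl (fun acc r =>
    (PySem.List.pyRange 0 width 1).foldl
      (fun (acc : List (List Int) × List (List Int)) c =>
        let val := PySem.List.pyGetD (PySem.List.pyGetD grid r []) c ""
        if PySem.Str.strIsdigit val then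
          let n := (PySem.Int.ofStr? val).getD 0
          let nbs := neighbor_vars r c height width
          (acc.1 ++ (combos nbs ((nbs.length : Int) - n + 1)
                 ++ (combos nbs (n + 1)).map (fun comb => comb.map (fun v => -v))),
           acc.2 ++ [[-(varnum r c width)]])
        else acc) acc)
    (([], []) : List (List Int) × List (List Int))
  acc.1 ++ acc.2

-- ===== PRECONDITION & SPEC =====
-- closed-form number of in-grid neighbours of cell (r, c)
def nbCount (r c height width : Int) : Int :=
  ((if 0 < r then 1 else 0) + 1 + (if r < height - 1 then 1 else 0)) *
  ((if 0 < c then 1 else 0) + 1 + (if c < width - 1 then 1 else 0)) - 1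

-- Pre_ excludes exactly the inputs where Python A raises: the empty grid and ragged grids
-- (IndexError on grid[0] / grid[r][c]), and grids where some digit cell's number exceeds its
-- neighbour count + 1 (itertools.combinations gets a negative r: ValueError).  The 0 ≤ n
-- conjunct is automatically true for isdigit strings and excludes nothing.
def Pre_generate_cnf (grid : List (List String)) : Prop :=
  grid ≠ [] ∧
  (∀ row ∈ grid, (grid.headD []).length ≤ row.length) ∧
  (∀ r, r < grid.length → ∀ c, c < (grid.headD []).length →
    PySem.Str.strIsdigit ((grid.getD r []).getD c "") = true →
      0 ≤ (PySem.Int.ofStr? ((grid.getD r []).getD c "")).getD 0 ∧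
      (PySem.Int.ofStr? ((grid.getD r []).getD c "")).getD 0 ≤
        nbCount r c grid.length (grid.headD []).length + 1)

instance (grid : List (List String)) : Decidable (Pre_generate_cnf grid) := by
  unfold Pre_generate_cnf; infer_instance

def pvWitness_generate_cnf : List (List String) := [["1", "T"], ["_", "2"]]

def Spec_generate_cnf (grid : List (List String)) (out : List (List Int)) : Prop := out = generate_cnf_alt grid
instance (grid : List (List String)) (out : List (List Int)) : Decidable (Spec_generate_cnf grid out) := by unfold Spec_generate_cnf; infer_instance

-- ===== CLAIM (what is proved, stated in full; the proofs are below) =====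
def Claim_equal_generate_cnf : Prop := ∀ (grid : List (List String)), Dom_generate_cnf grid → Pre_generate_cnf grid → Spec_generate_cnf grid (generate_cnf grid)


-- ===== LEMMAS AND PROOFS =====

theorem combos_eq_combAux (xs : List Int) (k : Nat) : combos xs (k : Int) = combAux xs k := by
  induction xs generalizing k with
  | nil =>
    cases k with
    | zero => simp [combos, combAux]
    | succ k => rw [combos]; simp [combAux]; omega
  | cons x t ih =>
    cases k with
    | zero => simp [combos, combAux]
    | succ k =>
      rw [combos]
      have h1 : ((k + 1 : Nat) : Int) ≠ 0 := by omega
      have h2 : ((k + 1 : Nat) : Int) - 1 = (k : Int) := by omega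
      simp only [h1, if_false, h2, ih, combAux]

-- per-offset cell of A's neighbour generator (proof-only helper)
def nbCell (r c height width dr dc : Int) : List (Int × Int) :=
  if dr = 0 ∧ dc = 0 then []
  else if 0 ≤ r + dr ∧ r + dr < height ∧ 0 ≤ c + dc ∧ c + dc < width
  then [(r + dr, c + dc)] else []

theorem neighborsA_eq_flatMap (r c height width : Int) :
    neighborsA r c height width =
      ([-1, 0, 1] : List Int).flatMap (fun dr =>
        ([-1, 0, 1] : List Int).flatMap (fun dc => nbCell r c height width dr dc)) := by
  unfold neighborsA
  have inner : ∀ (acc : List (Int × Int)) (dr : Int),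
      ([-1, 0, 1] : List Int).foldl (fun acc dc =>
        if dr = 0 ∧ dc = 0 then acc
        else
          let nr := r + dr
          let nc := c + dc
          if 0 ≤ nr ∧ nr < height ∧ 0 ≤ nc ∧ nc < width then acc ++ [(nr, nc)] else acc) acc
      = acc ++ ([-1, 0, 1] : List Int).flatMap (fun dc => nbCell r c height width dr dc) := by
    intro acc dr
    rw [PySem.List.foldl_congr_mem (g := fun acc dc => acc ++ nbCell r c height width dr dc)]
    · exact PySem.List.foldl_append_eq_flatMap _ _ _
    · intro acc dc _
      simp only [nbCell]
      split_ifs <;> simp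
  rw [PySem.List.foldl_congr_mem (g := fun acc dr =>
        acc ++ ([-1, 0, 1] : List Int).flatMap (fun dc => nbCell r c height width dr dc))]
  · rw [PySem.List.foldl_append_eq_flatMap]; rfl
  · intro acc dr _; exact inner acc dr

theorem neighbor_vars_eq (r c height width : Int) :
    neighbor_vars r c height width =
      (neighborsA r c height width).map (fun p => varnum p.1 p.2 width) := by
  rw [neighborsA_eq_flatMap]
  simp only [neighbor_vars, List.map_flatMap]
  have cell : ∀ dr dc : Int,
      (if (dr ≠ 0 ∨ dc ≠ 0) ∧ 0 ≤ r + dr ∧ r + dr < height ∧ 0 ≤ c + dc ∧ c + dc < width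
       then [varnum (r + dr) (c + dc) width] else [])
      = (nbCell r c height width dr dc).map (fun p => varnum p.1 p.2 width) := by
    intro dr dc
    simp only [nbCell]
    split_ifs <;> simp_all
  simp only [cell]

theorem length_neighborsA (r c height width : Int)
    (hr0 : 0 ≤ r) (hrh : r < height) (hc0 : 0 ≤ c) (hcw : c < width) :
    ((neighborsA r c height width).length : Int) = nbCount r c height width := by
  rw [neighborsA_eq_flatMap]
  simp only [List.flatMap_cons, List.flatMap_nil, List.append_nil, List.length_append, nbCell]
  norm_num [apply_ite List.length]
  have c1 : (1 ≤ r ∧ r ≤ height ∧ 1 ≤ c ∧ c ≤ width) ↔ (0 < r ∧ 0 < c) := by omega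
  have c2 : (1 ≤ r ∧ r ≤ height ∧ 0 ≤ c ∧ c < width) ↔ (0 < r) := by omega
  have c3 : (1 ≤ r ∧ r ≤ height ∧ 0 ≤ c + 1 ∧ c + 1 < width) ↔ (0 < r ∧ c < width - 1) := by omega
  have c4 : (0 ≤ r ∧ r < height ∧ 1 ≤ c ∧ c ≤ width) ↔ (0 < c) := by omega
  have c5 : (0 ≤ r ∧ r < height ∧ 0 ≤ c + 1 ∧ c + 1 < width) ↔ (c < width - 1) := by omega
  have c6 : (0 ≤ r + 1 ∧ r + 1 < height ∧ 1 ≤ c ∧ c ≤ width) ↔ (r < height - 1 ∧ 0 < c) := by omega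
  have c7 : (0 ≤ r + 1 ∧ r + 1 < height ∧ 0 ≤ c ∧ c < width) ↔ (r < height - 1) := by omega
  have c8 : (0 ≤ r + 1 ∧ r + 1 < height ∧ 0 ≤ c + 1 ∧ c + 1 < width) ↔ (r < height - 1 ∧ c < width - 1) := by omega
  simp only [c1, c2, c3, c4, c5, c6, c7, c8]
  unfold nbCount
  by_cases h1 : 0 < r <;> by_cases h2 : r < height - 1 <;>
    by_cases h3 : 0 < c <;> by_cases h4 : c < width - 1 <;>
    simp [h1, h2, h3, h4]

theorem exactly_n_eq (vars_ : List Int) (n : Int) (h0 : 0 ≤ n)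
    (h1 : n ≤ (vars_.length : Int) + 1) :
    exactly_n vars_ n =
      combos vars_ ((vars_.length : Int) - n + 1)
        ++ (combos vars_ (n + 1)).map (fun comb => comb.map (fun v => -v)) := by
  simp only [exactly_n]
  rw [PySem.List.foldl_append_singleton_eq_self, PySem.List.foldl_append_singleton_eq_map]
  have e1 : pyCombinations vars_ ((vars_.length : Int) - n + 1)
      = combos vars_ ((vars_.length : Int) - n + 1) := by
    unfold pyCombinations
    rw [if_neg (by omega)]
    rw [← combos_eq_combAux]
    congr 1
    omega
  have e2 : pyCombinations vars_ (n + 1) = combos vars_ (n + 1) := by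
    unfold pyCombinations
    rw [if_neg (by omega)]
    rw [← combos_eq_combAux]
    congr 1
    omega
  simp only [e1, e2, List.nil_append]

theorem flatMap_congr_mem {α β : Type} (l : List α) (f g : α → List β)
    (h : ∀ x ∈ l, f x = g x) : l.flatMap f = l.flatMap g := by
  induction l with
  | nil => rfl
  | cons x t ih =>
    simp only [List.flatMap_cons, h x (by simp), ih (fun y hy => h y (by simp [hy]))]

theorem foldl_if_append {β γ : Type} (C : List β) (q : β → Prop) [DecidablePred q]
    (g : β → List γ) (init : List γ) :
    C.foldl (fun acc c => if q c then acc ++ g c else acc) init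
      = init ++ C.flatMap (fun c => if q c then g c else []) := by
  induction C generalizing init with
  | nil => simp
  | cons c C ih =>
    simp only [List.foldl_cons, List.flatMap_cons, ih]
    split_ifs <;> simp

theorem foldl2_if_append {α β γ : Type} (R : List α) (C : List β)
    (p : α → β → Prop) [∀ a b, Decidable (p a b)] (g : α → β → List γ) (init : List γ) :
    R.foldl (fun acc r => C.foldl (fun acc c => if p r c then acc ++ g r c else acc) acc) init
      = init ++ R.flatMap (fun r => C.flatMap (fun c => if p r c then g r c else [])) := by
  simp only [foldl_if_append, PySem.List.foldl_append_eq_flatMap]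

theorem foldl_pair_if_append {β γ : Type} (C : List β) (q : β → Prop) [DecidablePred q]
    (g u : β → List γ) (p : List γ × List γ) :
    C.foldl (fun acc c => if q c then (acc.1 ++ g c, acc.2 ++ u c) else acc) p
      = (p.1 ++ C.flatMap (fun c => if q c then g c else []),
         p.2 ++ C.flatMap (fun c => if q c then u c else [])) := by
  induction C generalizing p with
  | nil => simp
  | cons c C ih =>
    simp only [List.foldl_cons, List.flatMap_cons, ih]
    split_ifs <;> simp

theorem foldl_prod_append {α γ : Type} (l : List α) (F U : α → List γ)
    (p : List γ × List γ) :
    l.foldl (fun acc x => (acc.1 ++ F x, acc.2 ++ U x)) p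
      = (p.1 ++ l.flatMap F, p.2 ++ l.flatMap U) := by
  induction l generalizing p with
  | nil => simp
  | cons x t ih => simp [ih, List.append_assoc]

theorem foldl2_pair_if_append {α β γ : Type} (R : List α) (C : List β)
    (p : α → β → Prop) [∀ a b, Decidable (p a b)] (g u : α → β → List γ)
    (init : List γ × List γ) :
    R.foldl (fun acc r =>
      C.foldl (fun acc c => if p r c then (acc.1 ++ g r c, acc.2 ++ u r c) else acc) acc) init
      = (init.1 ++ R.flatMap (fun r => C.flatMap (fun c => if p r c then g r c else [])),
         init.2 ++ R.flatMap (fun r => C.flatMap (fun c => if p r c then u r c else []))) := by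
  simp only [foldl_pair_if_append, foldl_prod_append]

theorem headD_eq_getD (grid : List (List String)) : grid.headD [] = grid.getD 0 [] := by
  cases grid <;> rfl

-- ===== VERDICT (by name: the statement is the Claim_ definition above) =====
theorem generate_cnf_spec : Claim_equal_generate_cnf := by
  intro grid _ hpre
  unfold Spec_generate_cnf
  simp only [generate_cnf, generate_cnf_alt]
  rw [foldl2_if_append, foldl2_if_append, foldl2_pair_if_append]
  simp only [List.nil_append]
  congr 1
  refine flatMap_congr_mem _ _ _ ?_
  intro r hr
  refine flatMap_congr_mem _ _ _ ?_
  intro c hc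
  rw [PySem.List.mem_pyRange_one] at hr hc
  obtain ⟨hr0, hrH⟩ := hr
  obtain ⟨hc0, hcW⟩ := hc
  by_cases hd : PySem.Str.strIsdigit (PySem.List.pyGetD (PySem.List.pyGetD grid r []) c "") = true
  · rw [if_pos hd, if_pos hd, neighbor_vars_eq]
    -- bring Pre_'s per-cell bound to this cell
    have h0g : PySem.List.pyGetD grid 0 [] = grid.headD [] := by
      rw [headD_eq_getD, PySem.List.pyGetD_zero]
    have hrn : r.toNat < grid.length := by omega
    have hrow : grid.getD r.toNat [] = grid[r.toNat] := List.getD_eq_getElem _ _ hrn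
    have hmem : grid[r.toNat] ∈ grid := List.getElem_mem _
    have hcn : c.toNat < (grid.headD []).length := by
      rw [← h0g]; omega
    have hclen : c.toNat < (grid[r.toNat] : List String).length :=
      lt_of_lt_of_le hcn (hpre.2.1 _ hmem)
    have hval : PySem.List.pyGetD (PySem.List.pyGetD grid r []) c ""
        = (grid.getD r.toNat []).getD c.toNat "" := by
      rw [PySem.List.pyGetD_eq_getElem _ _ hr0 hrH, hrow,
          List.getD_eq_getElem _ _ hclen,
          PySem.List.pyGetD_eq_getElem _ _ hc0 (by omega)]
    have hp := hpre.2.2 r.toNat hrn c.toNat hcn (by rw [← hval]; exact hd)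
    rw [← hval] at hp
    have hrcast : ((r.toNat : Int)) = r := Int.toNat_of_nonneg hr0
    have hccast : ((c.toNat : Int)) = c := Int.toNat_of_nonneg hc0
    rw [hrcast, hccast, ← h0g] at hp
    have hlen : (((neighborsA r c (grid.length : Int) ((PySem.List.pyGetD grid 0 []).length : Int)).map
        (fun p => varnum p.1 p.2 ((PySem.List.pyGetD grid 0 []).length : Int))).length : Int)
        = nbCount r c (grid.length : Int) ((PySem.List.pyGetD grid 0 []).length : Int) := by
      rw [List.length_map]
      exact length_neighborsA _ _ _ _ hr0 hrH hc0 hcW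
    exact exactly_n_eq _ _ hp.1 (by rw [hlen]; exact hp.2)
  · rw [if_neg hd, if_neg hd]
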